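-- pv_equiv track=rewrite | github.com/wpognonec/PY110 | lesson_1/13_selection_transformation/double_numbers.py | double_odd_numbers
-- ===== SOURCE A (Python) =====
-- def double_odd_numbers(numbers):
--     doubled = []
--     for i,v in enumerate(numbers):
--         if i % 2 == 0:
--             doubled.append(v * 2)
--         else:
--             doubled.append(v)
--     return doubled
-- ===== SOURCE B (Python) =====
-- def double_odd_numbers(numbers):
--     result = list(numbers)
--     result[::2] = [v * 2 for v in result[::2]]
--     return result
-- ===== Notes on version B (the rewrite author's own statement) =====
-- stated objective: idiomatic
-- what changed: Replaces the enumerate loop with per-index if/else appends by a copy plus a single strided slice assignment result[::2] = [v*2 for v in result[::2]].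
import Mathlib
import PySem

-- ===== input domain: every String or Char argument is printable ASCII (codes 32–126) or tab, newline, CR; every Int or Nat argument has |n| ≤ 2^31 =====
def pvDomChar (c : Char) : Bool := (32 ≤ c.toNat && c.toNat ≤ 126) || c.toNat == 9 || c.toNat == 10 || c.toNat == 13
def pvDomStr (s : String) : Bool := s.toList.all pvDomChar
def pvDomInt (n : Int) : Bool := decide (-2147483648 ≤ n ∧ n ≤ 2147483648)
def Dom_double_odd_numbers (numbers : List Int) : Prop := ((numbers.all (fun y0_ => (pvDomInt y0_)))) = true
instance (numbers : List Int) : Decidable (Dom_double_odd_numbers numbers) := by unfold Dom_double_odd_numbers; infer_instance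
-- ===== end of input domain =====

-- B copies the list and doubles the even-index positions via one strided slice assignment
-- instead of A's enumerate loop with a per-element if/else; same O(n) cost, no speed claim.

-- ===== PORT A =====
def double_odd_numbers (numbers : List Int) : List Int :=
  (PySem.List.enumerate numbers).foldl
    (fun doubled iv =>
      if iv.1 % 2 == 0 then doubled ++ [iv.2 * 2] else doubled ++ [iv.2]) []

-- ===== PORT B =====
-- result[::2] (step-2 slice of the whole list); exact for Python's xs[::2]
def pvStride2 : List Int → List Int
  | [] => []
  | [x] => [x]
  | x :: _ :: xs => x :: pvStride2 xs

-- result[::2] = vs (Python strided slice assignment, lengths equal); exact for that case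
def pvAssign2 : List Int → List Int → List Int
  | [], _ => []
  | x :: xs, [] => x :: xs
  | [_], v :: _ => [v]
  | _ :: y :: ys, v :: vs => v :: y :: pvAssign2 ys vs

def double_odd_numbers_alt (numbers : List Int) : List Int :=
  pvAssign2 numbers ((pvStride2 numbers).map (fun v => v * 2))

-- ===== PRECONDITION & SPEC =====
def Spec_double_odd_numbers (numbers : List Int) (out : List Int) : Prop := out = double_odd_numbers_alt numbers
instance (numbers : List Int) (out : List Int) : Decidable (Spec_double_odd_numbers numbers out) := by unfold Spec_double_odd_numbers; infer_instance

-- ===== CLAIM (what is proved, stated in full; the proofs are below) =====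
def Claim_equal_double_odd_numbers : Prop := ∀ (numbers : List Int), Dom_double_odd_numbers numbers → Spec_double_odd_numbers numbers (double_odd_numbers numbers)

-- ===== LEMMAS AND PROOFS =====

theorem pv_loopA (l : List Int) : ∀ (acc : List Int) (i : Int), i % 2 = 0 →
    (PySem.List.enumerate l i).foldl
      (fun doubled iv =>
        if iv.1 % 2 == 0 then doubled ++ [iv.2 * 2] else doubled ++ [iv.2]) acc
      = acc ++ pvAssign2 l ((pvStride2 l).map (fun v => v * 2)) := by
  induction l using pvStride2.induct with
  | case1 =>
      intro acc i _
      simp [PySem.List.enumerate_nil, pvAssign2]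
  | case2 x =>
      intro acc i hi
      simp [PySem.List.enumerate_cons, PySem.List.enumerate_nil, pvStride2, pvAssign2, hi]
  | case3 x y xs ih =>
      intro acc i hi
      have h2 : (i + 1 + 1) % 2 = 0 := by omega
      have hb0 : (i % 2 == 0) = true := by simp [hi]
      have hb1 : ((i + 1) % 2 == 0) = false := by simp; omega
      simp only [PySem.List.enumerate_cons, List.foldl_cons, hb0, hb1, if_true, if_false,
        Bool.false_eq_true, ite_true, ite_false]
      rw [ih _ _ h2]
      simp [pvStride2, pvAssign2]

-- ===== VERDICT (by name: the statement is the Claim_ definition above) =====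
theorem double_odd_numbers_spec : Claim_equal_double_odd_numbers := by
  intro numbers _
  unfold Spec_double_odd_numbers double_odd_numbers double_odd_numbers_alt
  simpa using pv_loopA numbers [] 0 rfl
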